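-- pv_equiv track=rewrite | github.com/csangwin/Collatz-Conjecture | collatz.py | step_in_path_count
-- ===== SOURCE A (Python) =====
-- def collatz(n):
--     '''For any number n, return the pathway it takes to get to 1.'''
--     pathway = []
--     m = n
--     while m != 1:
--         pathway.append(m)
--         if m % 2 == 0:
--             m = m // 2
--         else:
--             m = m * 3 + 1
--     return pathway
--
-- def step_in_path_count(n):
--     '''Count how many paths each step was a part of. Counts all all_paths
--     from 2 to n.'''
--     all_paths = []
--     step_touch_count = {}
--     for i in range(2, n + 1):
--         path = collatz(i)
--         all_paths.append(path)
--
--     for path in all_paths: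
--         for step in path:
--             if step in step_touch_count:
--                 step_touch_count[step] += 1
--             else:
--                 step_touch_count[step] = 1
--     return step_touch_count
-- ===== SOURCE B (Python) =====
-- def step_in_path_count(n):
--     '''Count how many paths each step was a part of. Counts all all_paths
--     from 2 to n.'''
--     memo = {}
--     counts = {}
--     for i in range(2, n + 1):
--         prefix = []
--         m = i
--         while m != 1 and m not in memo:
--             prefix.append(m)
--             m = m // 2 if m % 2 == 0 else m * 3 + 1
--         path = prefix + (memo[m] if m != 1 else [])
--         for j in range(len(prefix)):
--             memo[prefix[j]] = path[j:]
--         for step in path: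
--             counts[step] = counts.get(step, 0) + 1
--     return counts
-- ===== Notes on version B (the rewrite author's own statement) =====
-- stated objective: alternative
-- what changed: B caches the Collatz path suffix of every value it has already walked in a dict, so each new start only walks the unseen prefix and reuses the cached tail, and it counts touches in the same single pass instead of first materializing the list of all paths.
import Mathlib
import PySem

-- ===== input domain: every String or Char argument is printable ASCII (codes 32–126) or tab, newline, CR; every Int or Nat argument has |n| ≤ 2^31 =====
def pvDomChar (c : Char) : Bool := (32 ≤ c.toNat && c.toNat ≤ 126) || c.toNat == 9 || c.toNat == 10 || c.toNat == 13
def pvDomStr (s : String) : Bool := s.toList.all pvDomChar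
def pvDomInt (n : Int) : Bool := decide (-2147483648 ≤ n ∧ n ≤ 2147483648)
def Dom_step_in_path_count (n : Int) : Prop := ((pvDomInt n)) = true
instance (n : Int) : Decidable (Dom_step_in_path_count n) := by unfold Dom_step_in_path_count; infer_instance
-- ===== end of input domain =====

-- B caches Collatz path suffixes in a dict and counts in a single pass;
-- A recomputes every path from scratch and counts in a second phase.
-- Python `while m != 1` has no bound; both ports totalize it with the same fuel `pvFuel`
-- (far above any path length reachable in practice; the fuel guards only make the loops total).

-- ===== PORT A =====
-- the shared Collatz step: m // 2 if m % 2 == 0 else m * 3 + 1 (Python floor semantics)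
def pvStep (m : Int) : Int :=
  if PySem.Int.mod m 2 = 0 then PySem.Int.floordiv m 2 else m * 3 + 1

def pvFuel : Nat := 100000

-- while m != 1: pathway.append(m); m = step(m)   (fuel makes the loop total)
def collatzLoop : Nat → Int → List Int → List Int
  | 0, _, pathway => pathway
  | f + 1, m, pathway => if m = 1 then pathway else collatzLoop f (pvStep m) (pathway ++ [m])

def collatz (n : Int) : List Int := collatzLoop pvFuel n []

-- if step in d: d[step] += 1 else: d[step] = 1
def countStepA (d : PySem.Dict Int Int) (s : Int) : PySem.Dict Int Int :=
  match d.get? s with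
  | some c => d.insert s (c + 1)
  | none => d.insert s 1

def step_in_path_count (n : Int) : List (Int × Int) :=
  let all_paths := (PySem.List.pyRange 2 (n + 1) 1).foldl (fun aps i => aps ++ [collatz i]) []
  let d := all_paths.foldl (fun d path => path.foldl countStepA d) PySem.Dict.empty
  d.items

-- ===== PORT B =====
-- while m != 1 and m not in memo: prefix.append(m); m = step(m)
-- returns (prefix, final m, remaining fuel); the fuel and the `s.length ≤ f + 1` test only
-- totalize the loop: with enough fuel it stops exactly where Python's condition stops.
def walkPrefix (memo : PySem.Dict Int (List Int)) : Nat → Int → List Int × Int × Nat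
  | 0, m => ([], m, 0)
  | f + 1, m =>
    if m = 1 then ([], m, f + 1)
    else
      match memo.get? m with
      | some s =>
          if s.length ≤ f + 1 then ([], m, f + 1)
          else
            let r := walkPrefix memo f (pvStep m)
            (m :: r.1, r.2.1, r.2.2)
      | none =>
          let r := walkPrefix memo f (pvStep m)
          (m :: r.1, r.2.1, r.2.2)

-- memo[m] if m != 1 else []  — `none` marks the fuel-exhausted case, where Python's loop
-- would still be running, so the path stays truncated exactly like port A's.
def pickSuffix (memo : PySem.Dict Int (List Int)) (e : Int) (rem : Nat) : Option (List Int) :=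
  if e = 1 then some []
  else
    match memo.get? e with
    | some s => if s.length ≤ rem then some s else none
    | none => none

-- for j in range(len(prefix)): memo[prefix[j]] = path[j:]   (q walks the suffixes of path)
def storeSuffixes : PySem.Dict Int (List Int) → Nat → List Int → PySem.Dict Int (List Int)
  | memo, 0, _ => memo
  | memo, _ + 1, [] => memo
  | memo, k + 1, v :: t => storeSuffixes (memo.insert v (v :: t)) k t

-- one iteration of B's loop over i: walk the unseen prefix, reuse the cached tail,
-- cache the new suffixes (skipped iff the walk was fuel-truncated), count in the same pass
def bStep (st : PySem.Dict Int (List Int) × PySem.Dict Int Int) (i : Int) :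
    PySem.Dict Int (List Int) × PySem.Dict Int Int :=
  let memo := st.1
  let counts := st.2
  let pr := walkPrefix memo pvFuel i
  let sfx? := pickSuffix memo pr.2.1 pr.2.2
  let path := pr.1 ++ sfx?.getD []
  let memo' := if sfx?.isSome then storeSuffixes memo pr.1.length path else memo
  (memo', path.foldl (fun d v => d.insert v (d.getD v 0 + 1)) counts)

def step_in_path_count_alt (n : Int) : List (Int × Int) :=
  ((PySem.List.pyRange 2 (n + 1) 1).foldl bStep (PySem.Dict.empty, PySem.Dict.empty)).2.items

-- ===== PRECONDITION & SPEC =====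
def Spec_step_in_path_count (n : Int) (out : List (Int × Int)) : Prop := out = step_in_path_count_alt n
instance (n : Int) (out : List (Int × Int)) : Decidable (Spec_step_in_path_count n out) := by unfold Spec_step_in_path_count; infer_instance

-- ===== CLAIM (what is proved, stated in full; the proofs are below) =====
def Claim_equal_step_in_path_count : Prop := ∀ (n : Int), Dom_step_in_path_count n → Spec_step_in_path_count n (step_in_path_count n)

-- ===== LEMMAS AND PROOFS =====

-- cons-form of A's fueled Collatz walk, used as the common specification of both loops
def collatzF : Nat → Int → List Int
  | 0, _ => []
  | f + 1, m => if m = 1 then [] else m :: collatzF f (pvStep m)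

theorem collatzLoop_eq (f : Nat) : ∀ (m : Int) (acc : List Int),
    collatzLoop f m acc = acc ++ collatzF f m := by
  induction f with
  | zero => intro m acc; simp [collatzLoop, collatzF]
  | succ f ih =>
      intro m acc
      by_cases hm : m = 1
      · simp [collatzLoop, collatzF, hm]
      · simp [collatzLoop, collatzF, hm, ih]

-- `IsPath m p`: p is the COMPLETE Collatz path from m (any sufficient fuel reproduces it)
def IsPath (m : Int) (p : List Int) : Prop := ∀ f, p.length ≤ f → collatzF f m = p

theorem isPath_one : IsPath 1 [] := by
  intro f _; cases f <;> simp [collatzF]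

theorem isPath_cons {m : Int} {p : List Int} (hm : m ≠ 1) (h : IsPath (pvStep m) p) :
    IsPath m (m :: p) := by
  intro f hf
  cases f with
  | zero => simp at hf
  | succ f =>
      simp at hf
      simp [collatzF, hm, h f hf]

theorem isPath_tail {m v : Int} {t : List Int} (h : IsPath m (v :: t)) :
    v = m ∧ m ≠ 1 ∧ IsPath (pvStep m) t := by
  have h1 := h (t.length + 1) (by simp)
  by_cases hm : m = 1
  · simp [collatzF, hm] at h1
  · simp [collatzF, hm] at h1
    refine ⟨h1.1.symm, hm, ?_⟩
    intro f hf
    have h2 := h (f + 1) (by simp; omega)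
    simp [collatzF, hm] at h2
    exact h2.2

-- every value cached in the memo maps to its complete path
def MemoInv (memo : PySem.Dict Int (List Int)) : Prop :=
  ∀ v s, memo.get? v = some s → IsPath v s

theorem memoInv_empty : MemoInv PySem.Dict.empty := by
  intro v s h
  simp [PySem.Dict.get?_empty] at h

theorem walk_spec {memo : PySem.Dict Int (List Int)} (hInv : MemoInv memo) :
    ∀ (f : Nat) (m : Int),
      (walkPrefix memo f m).1 ++
        ((pickSuffix memo (walkPrefix memo f m).2.1 (walkPrefix memo f m).2.2).getD [])
      = collatzF f m := by
  intro f
  induction f with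
  | zero =>
      intro m
      by_cases hm : m = 1
      · simp [walkPrefix, pickSuffix, hm, collatzF]
      · cases hg : memo.get? m with
        | none => simp [walkPrefix, pickSuffix, hm, hg, collatzF]
        | some s =>
            by_cases hl : s.length ≤ 0
            · have : s = [] := List.eq_nil_of_length_eq_zero (by omega)
              simp [walkPrefix, pickSuffix, hm, hg, this, collatzF]
            · simp [walkPrefix, pickSuffix, hm, hg, hl, collatzF]
  | succ f ih =>
      intro m
      by_cases hm : m = 1
      · simp [walkPrefix, pickSuffix, hm, collatzF]
      · cases hg : memo.get? m with
        | none =>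
            simp only [walkPrefix, if_neg hm, hg]
            rw [List.cons_append, ih (pvStep m)]
            simp [collatzF, hm]
        | some s =>
            by_cases hl : s.length ≤ f + 1
            · have h1 := hInv m s hg (f + 1) hl
              simp only [walkPrefix, if_neg hm, hg, if_pos hl, pickSuffix]
              simp [h1]
            · simp only [walkPrefix, if_neg hm, hg, if_neg hl]
              rw [List.cons_append, ih (pvStep m)]
              simp [collatzF, hm]

theorem walk_isPath {memo : PySem.Dict Int (List Int)} (hInv : MemoInv memo) :
    ∀ (f : Nat) (m : Int),
      (pickSuffix memo (walkPrefix memo f m).2.1 (walkPrefix memo f m).2.2).isSome = true →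
      IsPath m ((walkPrefix memo f m).1 ++
        ((pickSuffix memo (walkPrefix memo f m).2.1 (walkPrefix memo f m).2.2).getD [])) := by
  intro f
  induction f with
  | zero =>
      intro m
      by_cases hm : m = 1
      · intro _; simp [walkPrefix, pickSuffix, hm]; exact isPath_one
      · cases hg : memo.get? m with
        | none => simp [walkPrefix, pickSuffix, hm, hg]
        | some s =>
            by_cases hl : s.length ≤ 0
            · intro _
              have hs := hInv m s hg
              have : s = [] := List.eq_nil_of_length_eq_zero (by omega)
              simpa [walkPrefix, pickSuffix, hm, hg, hl, this] using (this ▸ hs)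
            · simp [walkPrefix, pickSuffix, hm, hg, hl]
  | succ f ih =>
      intro m
      by_cases hm : m = 1
      · intro _; simp [walkPrefix, pickSuffix, hm]; exact isPath_one
      · cases hg : memo.get? m with
        | none =>
            intro hsome
            simp only [walkPrefix, pickSuffix, hm, hg] at hsome ⊢
            have hin := ih (pvStep m) (by simpa using hsome)
            simpa using isPath_cons hm hin
        | some s =>
            by_cases hl : s.length ≤ f + 1
            · intro _
              have hs := hInv m s hg
              simpa [walkPrefix, pickSuffix, hm, hg, hl] using hs
            · intro hsome
              simp only [walkPrefix, pickSuffix, hm, hg, hl] at hsome ⊢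
              have hin := ih (pvStep m) (by simpa using hsome)
              simpa using isPath_cons hm hin

-- a list that is the complete path of its own head
def SelfPath (q : List Int) : Prop :=
  match q with
  | [] => True
  | v :: _ => IsPath v q

theorem selfPath_of_isPath {m : Int} {q : List Int} (h : IsPath m q) : SelfPath q := by
  cases q with
  | nil => trivial
  | cons v t =>
      have := isPath_tail h
      simpa [SelfPath, this.1] using (this.1 ▸ h)

theorem selfPath_tail {v : Int} {t : List Int} (h : SelfPath (v :: t)) : SelfPath t := by
  have h1 := isPath_tail (h : IsPath v (v :: t))
  exact selfPath_of_isPath h1.2.2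

theorem storeSuffixes_inv : ∀ (k : Nat) (q : List Int) (memo : PySem.Dict Int (List Int)),
    MemoInv memo → SelfPath q → MemoInv (storeSuffixes memo k q) := by
  intro k
  induction k with
  | zero => intro q memo hInv _; simpa [storeSuffixes] using hInv
  | succ k ih =>
      intro q memo hInv hq
      cases q with
      | nil => simpa [storeSuffixes] using hInv
      | cons v t =>
          have hIns : MemoInv (memo.insert v (v :: t)) := by
            intro v' s' h'
            rw [PySem.Dict.get?_insert] at h'
            by_cases hv : v' = v
            · rw [if_pos hv] at h'
              obtain rfl : s' = v :: t := by simpa using h'.symm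
              rw [hv]
              exact (hq : IsPath v (v :: t))
            · rw [if_neg hv] at h'
              exact hInv v' s' h'
          exact ih t (memo.insert v (v :: t)) hIns (selfPath_tail hq)

theorem countStep_eq (d : PySem.Dict Int Int) (s : Int) :
    countStepA d s = d.insert s (d.getD s 0 + 1) := by
  cases hg : d.get? s with
  | some c => simp [countStepA, hg, PySem.Dict.getD_eq_get?_getD]
  | none => simp [countStepA, hg, PySem.Dict.getD_eq_get?_getD]

theorem main_loop : ∀ (l : List Int) (memo : PySem.Dict Int (List Int)) (counts : PySem.Dict Int Int),
    MemoInv memo →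
    (l.foldl bStep (memo, counts)).2
      = l.foldl (fun d i => (collatz i).foldl countStepA d) counts := by
  intro l
  induction l with
  | nil => intro memo counts _; simp
  | cons i l ih =>
      intro memo counts hInv
      have hpath :
          (walkPrefix memo pvFuel i).1 ++
            ((pickSuffix memo (walkPrefix memo pvFuel i).2.1 (walkPrefix memo pvFuel i).2.2).getD [])
          = collatz i := by
        rw [walk_spec hInv pvFuel i, collatz, collatzLoop_eq]; simp
      have hcounts :
          (bStep (memo, counts) i).2 = (collatz i).foldl countStepA counts := by
        simp only [bStep, hpath]
        have : (fun (d : PySem.Dict Int Int) (v : Int) => d.insert v (d.getD v 0 + 1))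
            = countStepA := by
          funext d v; rw [countStep_eq]
        rw [this]
      have hInv' : MemoInv (bStep (memo, counts) i).1 := by
        simp only [bStep]
        by_cases hs :
            (pickSuffix memo (walkPrefix memo pvFuel i).2.1 (walkPrefix memo pvFuel i).2.2).isSome = true
        · have hSelf := selfPath_of_isPath (walk_isPath hInv pvFuel i hs)
          simp only [hs, if_pos]
          exact storeSuffixes_inv _ _ _ hInv hSelf
        · simpa [hs] using hInv
      calc ((i :: l).foldl bStep (memo, counts)).2
          = (l.foldl bStep (bStep (memo, counts) i)).2 := by simp
        _ = l.foldl (fun d i => (collatz i).foldl countStepA d) (bStep (memo, counts) i).2 := by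
              rw [← ih (bStep (memo, counts) i).1 (bStep (memo, counts) i).2 hInv']
        _ = l.foldl (fun d i => (collatz i).foldl countStepA d)
              ((collatz i).foldl countStepA counts) := by rw [hcounts]
        _ = _ := by simp

-- ===== VERDICT (by name: the statement is the Claim_ definition above) =====
theorem foldl_append_collatz : ∀ (l : List Int) (acc : List (List Int)),
    l.foldl (fun aps i => aps ++ [collatz i]) acc = acc ++ l.map collatz := by
  intro l
  induction l with
  | nil => intro acc; simp
  | cons i l ih => intro acc; simp [ih]

theorem step_in_path_count_spec : Claim_equal_step_in_path_count := by
  intro n _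
  show step_in_path_count n = step_in_path_count_alt n
  simp only [step_in_path_count, step_in_path_count_alt]
  rw [foldl_append_collatz, List.nil_append, List.foldl_map,
    main_loop _ _ _ memoInv_empty]
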